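-- pv_equiv track=rewrite | github.com/coltonbegert/hackEDbeta2017-chess | bot/bot.py | bad_evaluation
-- ===== SOURCE A (Python) =====
-- def bad_evaluation(fen):
--     w_pieces = "RNBQPK"
--     b_pieces = "rnbqpk"
--     vals = [5, 3, 3, 9, 1,200]
--     score = 0
--     for i in range(6):
--         score += fen.count(w_pieces[i]) * vals[i]
--         score -= fen.count(b_pieces[i]) * vals[i]
--     return score
-- ===== SOURCE B (Python) =====
-- def bad_evaluation(fen):
--     values = {'R': 5, 'N': 3, 'B': 3, 'Q': 9, 'P': 1, 'K': 200,
--               'r': -5, 'n': -3, 'b': -3, 'q': -9, 'p': -1, 'k': -200}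
--     score = 0
--     for c in fen:
--         score += values.get(c, 0)
--     return score
-- ===== Notes on version B (the rewrite author's own statement) =====
-- stated objective: simpler
-- what changed: Replaces the loop over six piece types with twelve full string scans (fen.count per piece) by one single pass over the characters of fen, accumulating each character's signed value from one dict with default 0.
import Mathlib
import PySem

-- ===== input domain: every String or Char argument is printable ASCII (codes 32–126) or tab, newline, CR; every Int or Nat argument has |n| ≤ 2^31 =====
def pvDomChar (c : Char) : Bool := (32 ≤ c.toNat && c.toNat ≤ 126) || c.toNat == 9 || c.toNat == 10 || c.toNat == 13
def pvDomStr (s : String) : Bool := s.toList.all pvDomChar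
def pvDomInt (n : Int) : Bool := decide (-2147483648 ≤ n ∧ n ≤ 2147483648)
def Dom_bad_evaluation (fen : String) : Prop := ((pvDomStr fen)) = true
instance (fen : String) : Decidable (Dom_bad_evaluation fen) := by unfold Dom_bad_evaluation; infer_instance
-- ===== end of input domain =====

-- B replaces A's six-iteration loop (two fen.count scans per piece) with one single pass
-- over fen's characters accumulating signed values from one dict; objective: simpler.

-- ===== PORT A =====
def bad_evaluation (fen : String) : Int :=
  let w_pieces := "RNBQPK"
  let b_pieces := "rnbqpk"
  let vals : List Int := [5, 3, 3, 9, 1, 200]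
  (PySem.List.pyRange 0 6 1).foldl (fun score i =>
    let score := score
      + (PySem.Str.count fen (String.ofList [PySem.List.pyGetD w_pieces.toList i ' ']) : Int)
        * PySem.List.pyGetD vals i 0
    score
      - (PySem.Str.count fen (String.ofList [PySem.List.pyGetD b_pieces.toList i ' ']) : Int)
        * PySem.List.pyGetD vals i 0) 0

-- ===== PORT B =====
def pvValues : PySem.Dict Char Int :=
  PySem.Dict.ofList [('R', 5), ('N', 3), ('B', 3), ('Q', 9), ('P', 1), ('K', 200),
                     ('r', -5), ('n', -3), ('b', -3), ('q', -9), ('p', -1), ('k', -200)]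

def bad_evaluation_alt (fen : String) : Int :=
  fen.toList.foldl (fun score c => score + pvValues.getD c 0) 0

-- ===== PRECONDITION & SPEC =====
def Spec_bad_evaluation (fen : String) (out : Int) : Prop := out = bad_evaluation_alt fen
instance (fen : String) (out : Int) : Decidable (Spec_bad_evaluation fen out) := by unfold Spec_bad_evaluation; infer_instance

-- ===== CLAIM (what is proved, stated in full; the proofs are below) =====
def Claim_equal_bad_evaluation : Prop := ∀ (fen : String), Dom_bad_evaluation fen → Spec_bad_evaluation fen (bad_evaluation fen)

-- ===== LEMMAS AND PROOFS =====

-- Python's s.count(c) for a single character equals the per-character count.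
theorem count_go_single (c : Char) : ∀ (l : List Char) (fuel acc : Nat),
    l.length ≤ fuel → PySem.Chars.count.go [c] fuel l acc = acc + l.count c := by
  intro l
  induction l with
  | nil =>
    intro fuel acc _
    cases fuel <;> simp [PySem.Chars.count.go]
  | cons h t ih =>
    intro fuel acc hle
    cases fuel with
    | zero => simp at hle
    | succ f =>
      simp only [List.length_cons, Nat.succ_le_succ_iff] at hle
      rw [PySem.Chars.count.go]
      by_cases hc : c = h
      · subst hc
        rw [if_pos (by simp [List.isPrefixOf])]
        have hd : List.drop (List.length [c]) (c :: t) = t := by simp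
        rw [hd, ih f (acc + 1) hle]
        simp
        omega
      · rw [if_neg (by simp [List.isPrefixOf]; exact hc)]
        rw [ih f acc hle]
        simp [List.count_cons]
        exact fun e => hc e.symm

theorem count_single (s : String) (c : Char) :
    (PySem.Str.count s (String.ofList [c]) : Int) = (s.toList.count c : Int) := by
  have h1 : (String.ofList [c]).toList = [c] := by simp
  simp only [PySem.Str.count, PySem.Chars.count, h1]
  rw [if_neg (by simp)]
  rw [count_go_single c s.toList s.toList.length 0 le_rfl]
  simp

-- The dict lookup as a sum of per-piece indicator terms.
set_option maxHeartbeats 1000000 in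
theorem getD_pvValues (c : Char) :
    pvValues.getD c 0 = (5) * (if (c == 'R') = true then (1 : Int) else 0) + (3) * (if (c == 'N') = true then (1 : Int) else 0) + (3) * (if (c == 'B') = true then (1 : Int) else 0) + (9) * (if (c == 'Q') = true then (1 : Int) else 0) + (1) * (if (c == 'P') = true then (1 : Int) else 0) + (200) * (if (c == 'K') = true then (1 : Int) else 0) + (-5) * (if (c == 'r') = true then (1 : Int) else 0) + (-3) * (if (c == 'n') = true then (1 : Int) else 0) + (-3) * (if (c == 'b') = true then (1 : Int) else 0) + (-9) * (if (c == 'q') = true then (1 : Int) else 0) + (-1) * (if (c == 'p') = true then (1 : Int) else 0) + (-200) * (if (c == 'k') = true then (1 : Int) else 0) := by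
  by_cases h1 : c = 'R'
  · subst h1; decide
  by_cases h2 : c = 'N'
  · subst h2; decide
  by_cases h3 : c = 'B'
  · subst h3; decide
  by_cases h4 : c = 'Q'
  · subst h4; decide
  by_cases h5 : c = 'P'
  · subst h5; decide
  by_cases h6 : c = 'K'
  · subst h6; decide
  by_cases h7 : c = 'r'
  · subst h7; decide
  by_cases h8 : c = 'n'
  · subst h8; decide
  by_cases h9 : c = 'b'
  · subst h9; decide
  by_cases h10 : c = 'q'
  · subst h10; decide
  by_cases h11 : c = 'p'
  · subst h11; decide
  by_cases h12 : c = 'k'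
  · subst h12; decide
  have hpv : pvValues = PySem.Dict.mk
      [('R', 5), ('N', 3), ('B', 3), ('Q', 9), ('P', 1), ('K', 200),
       ('r', -5), ('n', -3), ('b', -3), ('q', -9), ('p', -1), ('k', -200)] := rfl
  rw [hpv]
  simp only [PySem.Dict.getD, PySem.Dict.get?_mk_cons]
  rw [if_neg (by simp [beq_iff_eq]; exact fun e => h1 e.symm),
      if_neg (by simp [beq_iff_eq]; exact fun e => h2 e.symm),
      if_neg (by simp [beq_iff_eq]; exact fun e => h3 e.symm),
      if_neg (by simp [beq_iff_eq]; exact fun e => h4 e.symm),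
      if_neg (by simp [beq_iff_eq]; exact fun e => h5 e.symm),
      if_neg (by simp [beq_iff_eq]; exact fun e => h6 e.symm),
      if_neg (by simp [beq_iff_eq]; exact fun e => h7 e.symm),
      if_neg (by simp [beq_iff_eq]; exact fun e => h8 e.symm),
      if_neg (by simp [beq_iff_eq]; exact fun e => h9 e.symm),
      if_neg (by simp [beq_iff_eq]; exact fun e => h10 e.symm),
      if_neg (by simp [beq_iff_eq]; exact fun e => h11 e.symm),
      if_neg (by simp [beq_iff_eq]; exact fun e => h12 e.symm)]
  simp only [PySem.Dict.get?]
  rw [if_neg (by simp [beq_iff_eq]; exact h1),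
      if_neg (by simp [beq_iff_eq]; exact h2),
      if_neg (by simp [beq_iff_eq]; exact h3),
      if_neg (by simp [beq_iff_eq]; exact h4),
      if_neg (by simp [beq_iff_eq]; exact h5),
      if_neg (by simp [beq_iff_eq]; exact h6),
      if_neg (by simp [beq_iff_eq]; exact h7),
      if_neg (by simp [beq_iff_eq]; exact h8),
      if_neg (by simp [beq_iff_eq]; exact h9),
      if_neg (by simp [beq_iff_eq]; exact h10),
      if_neg (by simp [beq_iff_eq]; exact h11),
      if_neg (by simp [beq_iff_eq]; exact h12)]
  simp

-- The single-pass fold equals the closed material sum.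
theorem fold_values (l : List Char) : ∀ (a : Int),
    l.foldl (fun score c => score + pvValues.getD c 0) a
      = a + 5 * (l.count 'R' : Int) + 3 * l.count 'N' + 3 * l.count 'B' + 9 * l.count 'Q'
          + 1 * l.count 'P' + 200 * l.count 'K'
          - 5 * l.count 'r' - 3 * l.count 'n' - 3 * l.count 'b' - 9 * l.count 'q'
          - 1 * l.count 'p' - 200 * l.count 'k' := by
  induction l with
  | nil => intro a; simp
  | cons h t ih =>
    intro a
    rw [List.foldl_cons, getD_pvValues, ih]
    simp only [List.count_cons]
    push_cast
    ring

theorem bad_evaluation_eq (fen : String) :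
    bad_evaluation fen
      = 5 * (fen.toList.count 'R' : Int) + 3 * fen.toList.count 'N' + 3 * fen.toList.count 'B'
          + 9 * fen.toList.count 'Q' + 1 * fen.toList.count 'P' + 200 * fen.toList.count 'K'
          - 5 * fen.toList.count 'r' - 3 * fen.toList.count 'n' - 3 * fen.toList.count 'b'
          - 9 * fen.toList.count 'q' - 1 * fen.toList.count 'p' - 200 * fen.toList.count 'k' := by
  have h : bad_evaluation fen
      = 0 + (PySem.Str.count fen (String.ofList ['R']) : Int) * 5
          - (PySem.Str.count fen (String.ofList ['r']) : Int) * 5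
          + (PySem.Str.count fen (String.ofList ['N']) : Int) * 3
          - (PySem.Str.count fen (String.ofList ['n']) : Int) * 3
          + (PySem.Str.count fen (String.ofList ['B']) : Int) * 3
          - (PySem.Str.count fen (String.ofList ['b']) : Int) * 3
          + (PySem.Str.count fen (String.ofList ['Q']) : Int) * 9
          - (PySem.Str.count fen (String.ofList ['q']) : Int) * 9
          + (PySem.Str.count fen (String.ofList ['P']) : Int) * 1
          - (PySem.Str.count fen (String.ofList ['p']) : Int) * 1
          + (PySem.Str.count fen (String.ofList ['K']) : Int) * 200
          - (PySem.Str.count fen (String.ofList ['k']) : Int) * 200 := rfl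
  rw [h]
  simp only [count_single]
  ring

-- ===== VERDICT (by name: the statement is the Claim_ definition above) =====
theorem bad_evaluation_spec : Claim_equal_bad_evaluation := by
  intro fen _
  unfold Spec_bad_evaluation bad_evaluation_alt
  rw [fold_values fen.toList 0, bad_evaluation_eq]
  ring
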